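-- pv_equiv track=rewrite | github.com/ip681/python-fundamentals | 05. Lists Advanced/05. Lists Advanced - More Exercise/02. TakeSkip Rope.py | uncover_message
-- ===== SOURCE A (Python) =====
-- def uncover_message(string, take, skip):
--     final_message = ""
--     for change in range(len(take)):
--         take_num = take[change]
--         skip_num = skip[change]
--         final_message += string[:take_num]
--         string = string[take_num:]
--         string = string[skip_num:]
--     return final_message
-- ===== SOURCE B (Python) =====
-- def _uncover(string, take, skip):
--     """Return (message collected over all take/skip pairs, remaining string)."""
--     if not take:
--         return "", string
--     if len(take) == 1:
--         return string[:take[0]], string[take[0]:][skip[0]:]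
--     mid = len(take) // 2
--     left, string = _uncover(string, take[:mid], skip[:mid])
--     right, string = _uncover(string, take[mid:], skip[mid:])
--     return left + right, string
--
--
-- def uncover_message(string, take, skip):
--     message, _ = _uncover(string, take, skip)
--     return message
-- ===== Notes on version B (the rewrite author's own statement) =====
-- stated objective: alternative
-- what changed: B is a divide-and-conquer: it splits the take/skip lists in half, recursively collects (message, remaining string) for each half and concatenates, instead of A's single index loop that destructively re-slices and reassigns the shrinking string; Pre_ excludes inputs where skip is shorter than take, on which both programs raise IndexError.
import Mathlib
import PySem

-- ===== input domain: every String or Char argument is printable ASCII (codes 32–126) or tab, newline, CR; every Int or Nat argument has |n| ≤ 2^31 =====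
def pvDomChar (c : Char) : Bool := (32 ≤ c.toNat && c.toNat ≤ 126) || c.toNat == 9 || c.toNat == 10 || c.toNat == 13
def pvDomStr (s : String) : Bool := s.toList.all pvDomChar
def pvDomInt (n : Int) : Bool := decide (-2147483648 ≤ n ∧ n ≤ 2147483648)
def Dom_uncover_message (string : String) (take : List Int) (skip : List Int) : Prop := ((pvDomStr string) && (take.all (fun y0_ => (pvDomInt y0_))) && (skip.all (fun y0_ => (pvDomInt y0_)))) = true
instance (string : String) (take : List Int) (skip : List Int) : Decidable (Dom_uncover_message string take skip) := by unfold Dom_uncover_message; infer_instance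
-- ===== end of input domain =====

-- B replaces A's index loop with destructive reassignment of the shrinking string by a
-- divide-and-conquer on the take/skip lists returning (message, remaining string) per half
-- (objective: alternative).

-- ===== PORT A =====
def uncover_message (string : String) (take : List Int) (skip : List Int) : String :=
  let r := (PySem.List.pyRange 0 (take.length : Int) 1).foldl
    (fun (st : List Char × List Char) change =>
      let take_num := PySem.List.pyGetD take change 0
      let skip_num := PySem.List.pyGetD skip change 0
      let final_message := st.1 ++ PySem.Chars.slice st.2 none (some take_num)
      let s := PySem.Chars.slice st.2 (some take_num) none
      let s := PySem.Chars.slice s (some skip_num) none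
      (final_message, s))
    ([], string.toList)
  String.ofList r.1

-- ===== PORT B =====
-- `_uncover` of Source B; `fuel` is a totality guard only (take.length halves at every
-- recursive call, so `take.length` fuel always suffices — see uncoverDC_fuel below).
-- take[:mid]/take[mid:] with 0 ≤ mid are exactly List.take/List.drop; skip[0] on empty
-- skip is a Python IndexError (outside Pre_), ported as the `[]` branch returning ([], s).
def uncoverDC (fuel : Nat) (s : List Char) (take : List Int) (skip : List Int) :
    List Char × List Char :=
  match fuel with
  | 0 => ([], s)
  | fuel + 1 =>
    match take with
    | [] => ([], s)
    | [t] =>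
      match skip with
      | [] => ([], s)
      | sk :: _ =>
        (PySem.Chars.slice s none (some t),
         PySem.Chars.slice (PySem.Chars.slice s (some t) none) (some sk) none)
    | _ :: _ :: _ =>
      let mid := take.length / 2
      let l := uncoverDC fuel s (take.take mid) (skip.take mid)
      let r := uncoverDC fuel l.2 (take.drop mid) (skip.drop mid)
      (l.1 ++ r.1, r.2)

def uncover_message_alt (string : String) (take : List Int) (skip : List Int) : String :=
  String.ofList (uncoverDC take.length string.toList take skip).1

-- ===== PRECONDITION & SPEC =====
-- A raises IndexError at skip[change] when skip is shorter than take; B raises there too.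
def Pre_uncover_message (string : String) (take : List Int) (skip : List Int) : Prop :=
  take.length ≤ skip.length
instance (string : String) (take : List Int) (skip : List Int) : Decidable (Pre_uncover_message string take skip) := by unfold Pre_uncover_message; infer_instance
def pvWitness_uncover_message : String × List Int × List Int := ("abcdefgh", [2, -3], [1, 0])

def Spec_uncover_message (string : String) (take : List Int) (skip : List Int) (out : String) : Prop := out = uncover_message_alt string take skip
instance (string : String) (take : List Int) (skip : List Int) (out : String) : Decidable (Spec_uncover_message string take skip out) := by unfold Spec_uncover_message; infer_instance

-- ===== CLAIM =====
def Claim_equal_uncover_message : Prop := ∀ (string : String) (take : List Int) (skip : List Int), Dom_uncover_message string take skip → Pre_uncover_message string take skip → Spec_uncover_message string take skip (uncover_message string take skip)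

-- ===== LEMMAS AND PROOFS =====

-- Linear reference recursion: (collected message, remaining string), one pair at a time.
def lin (s : List Char) : List Int → List Int → List Char × List Char
  | [], _ => ([], s)
  | _ :: _, [] => ([], s)
  | t :: ts, sk :: sks =>
    let s' := PySem.Chars.slice (PySem.Chars.slice s (some t) none) (some sk) none
    (PySem.Chars.slice s none (some t) ++ (lin s' ts sks).1, (lin s' ts sks).2)

-- lin splits over equal-length list appends.
theorem lin_append (T1 : List Int) : ∀ (S1 : List Int) (T2 S2 : List Int) (s : List Char),
    T1.length = S1.length →
    lin s (T1 ++ T2) (S1 ++ S2)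
      = ((lin s T1 S1).1 ++ (lin (lin s T1 S1).2 T2 S2).1, (lin (lin s T1 S1).2 T2 S2).2) := by
  induction T1 with
  | nil =>
    intro S1 T2 S2 s h
    have : S1 = [] := List.eq_nil_of_length_eq_zero (by simpa using h.symm)
    subst this; simp [lin]
  | cons t ts ih =>
    intro S1 T2 S2 s h
    match S1 with
    | [] => simp at h
    | sk :: sks =>
      simp only [List.cons_append, lin]
      rw [ih sks T2 S2 _ (by simpa using h)]
      simp [List.append_assoc]

-- With enough fuel (any fuel ≥ take.length) and skip at least as long as take,
-- the divide-and-conquer equals the linear recursion.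
theorem uncoverDC_fuel (fuel : Nat) : ∀ (T S : List Int) (s : List Char),
    T.length ≤ fuel → T.length ≤ S.length → uncoverDC fuel s T S = lin s T S := by
  induction fuel with
  | zero =>
    intro T S s hf _
    have : T = [] := List.eq_nil_of_length_eq_zero (by omega)

    subst this; simp [uncoverDC, lin]
  | succ n ih =>
    intro T S s hf hTS
    match T with
    | [] => simp [uncoverDC, lin]
    | [t] =>
      match S with
      | [] => simp at hTS
      | sk :: sks => simp [uncoverDC, lin]
    | t1 :: t2 :: ts =>
      set T := t1 :: t2 :: ts with hT
      have hlen : 2 ≤ T.length := by simp [hT]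
      simp only [uncoverDC]
      set mid := T.length / 2 with hmid
      have h1 : (T.take mid).length = mid := by simp [List.length_take]; omega
      have h2 : (S.take mid).length = mid := by simp [List.length_take]; omega
      have h3 : (T.drop mid).length = T.length - mid := by simp
      rw [ih (T.take mid) (S.take mid) s (by omega) (by omega)]
      rw [ih (T.drop mid) (S.drop mid) _ (by simp; omega) (by simp; omega)]
      have := lin_append (T.take mid) (S.take mid) (T.drop mid) (S.drop mid) s (by omega)
      rw [List.take_append_drop, List.take_append_drop] at this
      rw [this]

-- Loop invariant for A: starting the fold at index k with accumulated message `msg` and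
-- remaining string `s` yields `msg ++` the linear recursion on the suffixes from k.
theorem loopA_eq_lin (T S : List Int) (hTS : T.length ≤ S.length) :
    ∀ (n k : Nat), T.length = k + n → ∀ (msg s : List Char),
      ((PySem.List.pyRange (k : Int) (T.length : Int) 1).foldl
        (fun (st : List Char × List Char) change =>
          let take_num := PySem.List.pyGetD T change 0
          let skip_num := PySem.List.pyGetD S change 0
          let final_message := st.1 ++ PySem.Chars.slice st.2 none (some take_num)
          let s := PySem.Chars.slice st.2 (some take_num) none
          let s := PySem.Chars.slice s (some skip_num) none
          (final_message, s)) (msg, s)).1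
      = msg ++ (lin s (T.drop k) (S.drop k)).1 := by
  intro n
  induction n with
  | zero =>
    intro k hk msg s
    rw [PySem.List.pyRange_one_eq_nil (by omega)]
    rw [List.drop_eq_nil_of_le (by omega)]
    simp [lin]
  | succ m ih =>
    intro k hk msg s
    have hkT : k < T.length := by omega
    have hkS : k < S.length := by omega
    rw [PySem.List.pyRange_one_cons (by exact_mod_cast hkT)]
    simp only [List.foldl_cons]
    have hT : PySem.List.pyGetD T (k : Int) 0 = T[k] := by
      simp [PySem.List.pyGetD_natCast, List.getD_eq_getElem?_getD, List.getElem?_eq_getElem hkT]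
    have hS : PySem.List.pyGetD S (k : Int) 0 = S[k] := by
      simp [PySem.List.pyGetD_natCast, List.getD_eq_getElem?_getD, List.getElem?_eq_getElem hkS]
    have hcast : ((k : Int) + 1) = ((k + 1 : Nat) : Int) := by push_cast; ring
    rw [hT, hS, hcast]
    have := ih (k + 1) (by omega)
      (msg ++ PySem.Chars.slice s none (some T[k]))
      (PySem.Chars.slice (PySem.Chars.slice s (some T[k]) none) (some S[k]) none)
    rw [this]
    rw [List.drop_eq_getElem_cons hkT, List.drop_eq_getElem_cons hkS]
    simp [lin]

theorem ports_eq (string : String) (take skip : List Int)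
    (h : take.length ≤ skip.length) :
    uncover_message string take skip = uncover_message_alt string take skip := by
  unfold uncover_message uncover_message_alt
  rw [uncoverDC_fuel take.length take skip string.toList (le_refl _) h]
  have := loopA_eq_lin take skip h take.length 0 (by omega) [] string.toList
  simp only [Nat.cast_zero, List.drop_zero, List.nil_append] at this
  exact congrArg String.ofList this

-- ===== VERDICT =====
theorem uncover_message_spec : Claim_equal_uncover_message := by
  intro string take skip _ hpre
  unfold Spec_uncover_message
  exact ports_eq string take skip hpre
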